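-- pv_equiv track=rewrite | github.com/SweetHoneyNougat/sku-ai | app/feature_extraction.py | max_consecutive_characters
-- ===== SOURCE A (Python) =====
-- SYMBOLS = "`~!@#$%^&*()-_=+[{]}\\|;:'\",./?"
--
-- def is_same_type(a, b):
--     return (a.isnumeric() and b.isnumeric()) \
--         or (a in SYMBOLS and b in SYMBOLS) \
--         or (a.isupper() and b.isupper()) \
--         or (a.islower() and b.islower())
--
-- def max_consecutive_characters(password, d):
--     mx = cnt = 1
--     n = len(password)
--
--     for i in range(n-1):
--         if is_same_type(password[i], password[i+1]) and ord(password[i+1])-ord(password[i]) == d: cnt += 1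
--         else: cnt = 1
--
--         mx = max(mx, cnt)
--
--     return mx
-- ===== SOURCE B (Python) =====
-- SYMBOLS = "`~!@#$%^&*()-_=+[{]}\\|;:'\",./?"
--
-- def is_same_type(a, b):
--     return (a.isnumeric() and b.isnumeric()) \
--         or (a in SYMBOLS and b in SYMBOLS) \
--         or (a.isupper() and b.isupper()) \
--         or (a.islower() and b.islower())
--
-- def max_consecutive_characters(password, d):
--     # pass 1: adjacency flags; pass 2: run-length encode; pass 3: longest True run
--     matches = [is_same_type(a, b) and ord(b) - ord(a) == d
--                for a, b in zip(password, password[1:])]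
--     groups = []
--     for m in matches:
--         if groups and groups[-1][0] == m:
--             groups[-1] = (m, groups[-1][1] + 1)
--         else:
--             groups.append((m, 1))
--     longest = 0
--     for b, k in groups:
--         if b:
--             longest = max(longest, k)
--     return longest + 1
-- ===== Notes on version B (the rewrite author's own statement) =====
-- stated objective: alternative
-- what changed: Replaces the fused running-counter/max scan with three separate passes: build the adjacency-flag list, run-length-encode it, then take the longest True run and add 1.
import Mathlib
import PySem

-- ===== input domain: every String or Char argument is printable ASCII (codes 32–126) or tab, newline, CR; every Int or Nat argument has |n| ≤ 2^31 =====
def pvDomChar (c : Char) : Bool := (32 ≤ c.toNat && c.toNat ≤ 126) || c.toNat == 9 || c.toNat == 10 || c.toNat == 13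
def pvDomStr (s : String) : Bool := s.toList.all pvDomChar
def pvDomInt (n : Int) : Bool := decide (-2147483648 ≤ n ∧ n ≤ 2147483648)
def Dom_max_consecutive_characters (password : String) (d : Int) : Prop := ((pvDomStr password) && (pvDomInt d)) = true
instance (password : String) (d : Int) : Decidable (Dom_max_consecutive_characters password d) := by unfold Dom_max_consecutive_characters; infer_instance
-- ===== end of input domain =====

-- B replaces A's fused running-counter scan by three passes (flag list, run-length
-- encoding, longest True run + 1): an alternative decomposition, not claimed faster.

-- ===== PORT A =====
-- shared helper: is_same_type, exact for the printable-ASCII/tab/newline/CR domain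
-- (isnumeric/isupper/islower coincide with the ASCII ranges there)
def pvSymbols : List Char := "`~!@#$%^&*()-_=+[{]}\\|;:'\",./?".toList

def is_same_type (a b : Char) : Bool :=
  (('0' ≤ a && a ≤ '9') && ('0' ≤ b && b ≤ '9'))
  || (pvSymbols.contains a && pvSymbols.contains b)
  || (('A' ≤ a && a ≤ 'Z') && ('A' ≤ b && b ≤ 'Z'))
  || (('a' ≤ a && a ≤ 'z') && ('a' ≤ b && b ≤ 'z'))

-- the adjacency test both programs apply to a pair of neighbouring characters
def pvFlag (d : Int) (a b : Char) : Bool :=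
  is_same_type a b && ((b.toNat : Int) - (a.toNat : Int) == d)

-- A's loop over i in range(n-1), carrying the previous character and (cnt, mx)
def pvLoopA (d : Int) : Char → List Char → Int → Int → Int
  | _, [], _, mx => mx
  | a, b :: rest, cnt, mx =>
    let cnt' := if pvFlag d a b then cnt + 1 else 1
    pvLoopA d b rest cnt' (max mx cnt')

def max_consecutive_characters (password : String) (d : Int) : Int :=
  match password.toList with
  | [] => 1
  | c :: cs => pvLoopA d c cs 1 1

-- ===== PORT B =====
-- one run-length-encoding step: merge m into the last group or open a new one
def pvStep (acc : List (Bool × Int)) (m : Bool) : List (Bool × Int) :=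
  match acc.getLast? with
  | some (b, k) => if b == m then acc.dropLast ++ [(m, k + 1)] else acc ++ [(m, 1)]
  | none => [(m, 1)]

-- longest = max of the sizes of the True groups (0 if none)
def pvLongest (gs : List (Bool × Int)) : Int :=
  gs.foldl (fun a p => if p.1 then max a p.2 else a) 0

def max_consecutive_characters_alt (password : String) (d : Int) : Int :=
  let cs := password.toList
  let ms := List.zipWith (pvFlag d) cs cs.tail
  pvLongest (ms.foldl pvStep []) + 1

-- ===== PRECONDITION & SPEC =====
def Spec_max_consecutive_characters (password : String) (d : Int) (out : Int) : Prop := out = max_consecutive_characters_alt password d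
instance (password : String) (d : Int) (out : Int) : Decidable (Spec_max_consecutive_characters password d out) := by unfold Spec_max_consecutive_characters; infer_instance

-- ===== CLAIM (what is proved, stated in full; the proofs are below) =====
def Claim_equal_max_consecutive_characters : Prop := ∀ (password : String) (d : Int), Dom_max_consecutive_characters password d → Spec_max_consecutive_characters password d (max_consecutive_characters password d)

-- ===== LEMMAS AND PROOFS =====

-- A's loop with the pair flags pre-extracted (proof-only reference shape)
def pvA' : List Bool → Int → Int → Int
  | [], _, mx => mx
  | m :: rest, cnt, mx =>
    let cnt' := if m then cnt + 1 else 1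
    pvA' rest cnt' (max mx cnt')

-- cons-at-front variant of pvStep (groups kept in reverse order)
def pvCStep (acc : List (Bool × Int)) (m : Bool) : List (Bool × Int) :=
  match acc with
  | (b, k) :: t => if b == m then (m, k + 1) :: t else (m, 1) :: acc
  | [] => [(m, 1)]

-- the counter A carries, read off the head group of the reversed encoding
def pvCnt : List (Bool × Int) → Int
  | (true, k) :: _ => k + 1
  | _ => 1

theorem pvLoopA_flags (d : Int) (rest : List Char) : ∀ (a : Char) (cnt mx : Int),
    pvLoopA d a rest cnt mx = pvA' (List.zipWith (pvFlag d) (a :: rest) rest) cnt mx := by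
  induction rest with
  | nil => intro a cnt mx; rfl
  | cons b t ih =>
    intro a cnt mx
    simp only [pvLoopA, List.zipWith, pvA']
    exact ih b _ _

theorem pvStep_rev (acc : List (Bool × Int)) (m : Bool) :
    pvStep acc m = (pvCStep acc.reverse m).reverse := by
  rcases h : acc.reverse with _ | ⟨⟨b, k⟩, t⟩
  · have : acc = [] := by simpa using congrArg List.reverse h
    subst this; rfl
  · have hacc : acc = t.reverse ++ [(b, k)] := by
      have := congrArg List.reverse h
      simpa using this
    subst hacc
    simp only [pvStep, pvCStep, List.getLast?_append, List.getLast?_singleton]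
    by_cases hbm : b = m
    · simp [hbm, List.dropLast_append_of_ne_nil]
    · have : (b == m) = false := by simp [hbm]
      simp [this, List.append_assoc]

theorem pvFold_rev (ms : List Bool) : ∀ (acc : List (Bool × Int)),
    List.foldl pvStep acc ms = (List.foldl pvCStep acc.reverse ms).reverse := by
  induction ms with
  | nil => intro acc; simp
  | cons m t ih =>
    intro acc
    simp only [List.foldl]
    rw [pvStep_rev, ih, List.reverse_reverse]

theorem pvFoldMax_nonneg (l : List (Bool × Int)) : ∀ (a : Int), 0 ≤ a →
    0 ≤ List.foldl (fun a p => if p.1 then max a p.2 else a) a l := by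
  induction l with
  | nil => intro a ha; simpa using ha
  | cons p t ih =>
    intro a ha
    simp only [List.foldl]
    apply ih
    cases hp : p.1 <;> simp [hp] <;> omega

theorem pvLongest_nonneg (l : List (Bool × Int)) : 0 ≤ pvLongest l :=
  pvFoldMax_nonneg l 0 le_rfl

theorem pvFoldMax_eq (l : List (Bool × Int)) : ∀ (a : Int), 0 ≤ a →
    List.foldl (fun a p => if p.1 then max a p.2 else a) a l = max a (pvLongest l) := by
  induction l with
  | nil =>
    intro a ha
    simp only [List.foldl, pvLongest]
    omega
  | cons p t ih =>
    intro a ha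
    have ht : 0 ≤ List.foldl (fun a p => if p.1 then max a p.2 else a) 0 t :=
      pvFoldMax_nonneg t 0 le_rfl
    simp only [List.foldl, pvLongest]
    cases hp : p.1
    · simp only [hp, Bool.false_eq_true, if_false]
      exact ih a ha
    · simp only [hp, if_true]
      rw [ih (max a p.2) (by omega), ih (max 0 p.2) (by omega)]
      unfold pvLongest
      omega

theorem pvLongest_cons (p : Bool × Int) (t : List (Bool × Int)) :
    pvLongest (p :: t) = if p.1 then max (max 0 p.2) (pvLongest t) else pvLongest t := by
  simp only [pvLongest, List.foldl]
  cases hp : p.1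
  · simp [hp]
  · simp only [hp, if_true]
    exact pvFoldMax_eq t (max 0 p.2) (by omega)

theorem pvLongest_append_single (l : List (Bool × Int)) (p : Bool × Int) :
    pvLongest (l ++ [p]) = if p.1 then max (max 0 p.2) (pvLongest l) else pvLongest l := by
  have h0 : 0 ≤ pvLongest l := pvLongest_nonneg l
  have hstep : pvLongest (l ++ [p])
      = (if p.1 then max (pvLongest l) p.2 else pvLongest l) := by
    simp only [pvLongest, List.foldl_append, List.foldl]
  rw [hstep]
  cases hp : p.1
  · simp
  · simp only [if_true]
    omega

theorem pvLongest_reverse (l : List (Bool × Int)) : pvLongest l.reverse = pvLongest l := by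
  induction l with
  | nil => rfl
  | cons p t ih =>
    rw [List.reverse_cons, pvLongest_append_single, ih, pvLongest_cons]

-- the head of the accumulator encodes A's current counter, pvLongest the max so far
theorem pvMainInv (ms : List Bool) : ∀ (acc : List (Bool × Int)) (cnt mx : Int),
    (∀ p ∈ acc, 1 ≤ p.2) →
    cnt = pvCnt acc →
    mx = 1 + pvLongest acc →
    pvA' ms cnt mx = 1 + pvLongest (List.foldl pvCStep acc ms) := by
  induction ms with
  | nil =>
    intro acc cnt mx _ _ hmx
    simpa [pvA', List.foldl] using hmx
  | cons m t ih =>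
    intro acc cnt mx hpos hcnt hmx
    simp only [pvA', List.foldl]
    rcases acc with _ | ⟨⟨b, k⟩, rest⟩
    · -- acc = []
      simp only [pvCnt] at hcnt
      simp only [pvLongest, List.foldl] at hmx
      cases m <;>
      · refine ih _ _ _ (by simp [pvCStep]) (by simp [pvCStep, pvCnt]; try omega) ?_
        try simp only [pvCStep]
        rw [pvLongest_cons]
        simp [pvLongest, List.foldl]
        omega
    · have hk : 1 ≤ k := hpos (b, k) (by simp)
      have hrest : ∀ p ∈ rest, 1 ≤ p.2 := fun p hp => hpos p (by simp [hp])
      have hrl : 0 ≤ pvLongest rest := pvLongest_nonneg rest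
      rw [pvLongest_cons] at hmx
      cases b
      · -- head group is False: cnt = 1
        simp only [pvCnt] at hcnt
        simp only [Bool.false_eq_true, if_false] at hmx
        cases m
        · -- extend False group
          refine ih ((false, k + 1) :: rest) _ _ ?_ (by simp [pvCStep, pvCnt]; try omega) ?_
          · intro p hp
            rcases List.mem_cons.mp hp with h | h
            · simp [h]; omega
            · exact hrest p h
          · try simp only [pvCStep]
            rw [pvLongest_cons] at *
            try simp at hmx ⊢
            omega
        · -- open a True group
          refine ih ((true, 1) :: (false, k) :: rest) _ _ ?_ (by simp [pvCStep, pvCnt]; try omega) ?_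
          · intro p hp
            rcases List.mem_cons.mp hp with h | h
            · simp [h]
            · exact hpos p h
          · try simp only [pvCStep]
            rw [pvLongest_cons, pvLongest_cons]
            try simp
            omega
      · -- head group is True: cnt = k + 1
        simp only [pvCnt] at hcnt
        simp only [if_true] at hmx
        cases m
        · -- open a False group
          refine ih ((false, 1) :: (true, k) :: rest) _ _ ?_ (by simp [pvCStep, pvCnt]; try omega) ?_
          · intro p hp
            rcases List.mem_cons.mp hp with h | h
            · simp [h]
            · exact hpos p h
          · try simp only [pvCStep]
            rw [pvLongest_cons, pvLongest_cons]
            try simp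
            omega
        · -- extend the True group
          refine ih ((true, k + 1) :: rest) _ _ ?_ (by simp [pvCStep, pvCnt]; try omega) ?_
          · intro p hp
            rcases List.mem_cons.mp hp with h | h
            · simp [h]; omega
            · exact hrest p h
          · try simp only [pvCStep]
            rw [pvLongest_cons] at *
            try simp at hmx ⊢
            omega

-- ===== VERDICT (by name: the statement is the Claim_ definition above) =====
theorem max_consecutive_characters_spec : Claim_equal_max_consecutive_characters := by
  intro password d _
  unfold Spec_max_consecutive_characters
  rcases h : password.toList with _ | ⟨c, cs⟩
  · simp [max_consecutive_characters, max_consecutive_characters_alt, h, pvLongest]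
  · simp only [max_consecutive_characters, max_consecutive_characters_alt, h, List.tail_cons]
    rw [pvLoopA_flags,
      pvMainInv _ [] 1 1 (by simp) (by simp [pvCnt]) (by simp [pvLongest, List.foldl]),
      pvFold_rev, List.reverse_nil, pvLongest_reverse]
    omega
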